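-- pv_equiv track=rewrite | github.com/tatiana-lopes/LiquidBeings | Python/MoveNet_Unreal_v9.py | has_consecutive_fast_movements
-- ===== SOURCE A (Python) =====
-- def has_consecutive_fast_movements(history, times):
--     count = 0
--     for status in history:
--         if status:  # True means fast
--             count += 1
--             if count >= times:
--                 return True
--         else:
--             count = 0
--     return False
-- ===== SOURCE B (Python) =====
-- from itertools import groupby
--
-- def has_consecutive_fast_movements(history, times):
--     return any(sum(1 for _ in g) >= times
--                for k, g in groupby(history, key=bool) if k)
-- ===== Notes on version B (the rewrite author's own statement) =====
-- stated objective: idiomatic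
-- what changed: Replaced the reset-on-False counter loop with itertools.groupby splitting the history into maximal truthy runs and testing any truthy run's length against times.
import Mathlib
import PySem

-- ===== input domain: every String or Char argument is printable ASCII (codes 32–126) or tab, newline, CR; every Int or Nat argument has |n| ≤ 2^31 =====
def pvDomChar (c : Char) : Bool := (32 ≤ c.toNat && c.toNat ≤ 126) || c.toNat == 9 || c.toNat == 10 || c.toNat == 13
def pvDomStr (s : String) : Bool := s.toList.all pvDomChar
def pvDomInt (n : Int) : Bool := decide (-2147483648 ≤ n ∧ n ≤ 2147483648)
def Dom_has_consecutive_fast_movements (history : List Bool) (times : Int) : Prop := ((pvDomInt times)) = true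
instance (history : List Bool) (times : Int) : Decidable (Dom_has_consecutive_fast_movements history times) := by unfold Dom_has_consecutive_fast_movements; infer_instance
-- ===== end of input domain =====

-- B replaces A's reset-on-False counter loop with a groupby-style split of the
-- history into maximal runs of True, testing whether any run length reaches times
-- (idiomatic restructuring; same behaviour, including times <= 0 corners).

-- ===== PORT A =====
-- A's loop: counter resets on False, early-returns True when count >= times.
def hcfmLoopA : List Bool → Int → Int → Bool
  | [], _, _ => false
  | status :: rest, count, times =>
    if status then
      if times ≤ count + 1 then true else hcfmLoopA rest (count + 1) times
    else
      hcfmLoopA rest 0 times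

def has_consecutive_fast_movements (history : List Bool) (times : Int) : Bool :=
  hcfmLoopA history 0 times

-- ===== PORT B =====
-- groupby(history, key=bool) restricted to truthy groups: the lengths of the
-- maximal runs of True (c is the length of the run currently being scanned).
def hcfmTrueRuns : List Bool → Nat → List Nat
  | [], c => if 0 < c then [c] else []
  | true :: rest, c => hcfmTrueRuns rest (c + 1)
  | false :: rest, c => (if 0 < c then [c] else []) ++ hcfmTrueRuns rest 0

def has_consecutive_fast_movements_alt (history : List Bool) (times : Int) : Bool :=
  (hcfmTrueRuns history 0).any (fun r => decide (times ≤ (r : Int)))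

-- ===== PRECONDITION & SPEC =====
def Spec_has_consecutive_fast_movements (history : List Bool) (times : Int) (out : Bool) : Prop := out = has_consecutive_fast_movements_alt history times
instance (history : List Bool) (times : Int) (out : Bool) : Decidable (Spec_has_consecutive_fast_movements history times out) := by unfold Spec_has_consecutive_fast_movements; infer_instance

-- ===== CLAIM (what is proved, stated in full; the proofs are below) =====
def Claim_equal_has_consecutive_fast_movements : Prop := ∀ (history : List Bool) (times : Int), Dom_has_consecutive_fast_movements history times → Spec_has_consecutive_fast_movements history times (has_consecutive_fast_movements history times)

-- ===== LEMMAS AND PROOFS =====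

-- Once the current run has already reached times, B finds a long-enough run.
theorem hcfm_runs_hit (times : Int) :
    ∀ (l : List Bool) (c : Nat), 0 < c → times ≤ (c : Int) →
      (hcfmTrueRuns l c).any (fun r => decide (times ≤ (r : Int))) = true := by
  intro l
  induction l with
  | nil => intro c hc ht; simp [hcfmTrueRuns, hc, ht]
  | cons b rest ih =>
    intro c hc ht
    cases b with
    | true =>
      simp only [hcfmTrueRuns]
      exact ih (c + 1) (Nat.succ_pos c) (le_trans ht (by push_cast; omega))
    | false =>
      simp [hcfmTrueRuns, hc, ht]

-- Loop invariant: with a current count that has not yet reached times (or is 0),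
-- A's loop answers exactly "some remaining truthy run reaches times".
theorem hcfm_loop_eq_runs (times : Int) :
    ∀ (l : List Bool) (c : Nat), (c = 0 ∨ (c : Int) < times) →
      hcfmLoopA l (c : Int) times
        = (hcfmTrueRuns l c).any (fun r => decide (times ≤ (r : Int))) := by
  intro l
  induction l with
  | nil =>
    intro c hc
    rcases hc with h0 | hlt
    · simp [hcfmLoopA, hcfmTrueRuns, h0]
    · simp [hcfmLoopA, hcfmTrueRuns]
      intro _; omega
  | cons b rest ih =>
    intro c hc
    cases b with
    | true =>
      simp only [hcfmLoopA, hcfmTrueRuns, if_true]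
      by_cases h : times ≤ (c : Int) + 1
      · rw [if_pos h]
        exact (hcfm_runs_hit times rest (c + 1) (Nat.succ_pos c)
          (by push_cast; omega)).symm
      · rw [if_neg h]
        have : ((c : Int) + 1) = ((c + 1 : Nat) : Int) := by push_cast; ring
        rw [this]
        exact ih (c + 1) (Or.inr (by push_cast at h ⊢; omega))
    | false =>
      simp only [hcfmLoopA, hcfmTrueRuns, Bool.false_eq_true, if_false]
      have hrec := ih 0 (Or.inl rfl)
      rw [Nat.cast_zero] at hrec
      rcases hc with h0 | hlt
      · simpa [h0] using hrec
      · have hpre : (if 0 < c then [c] else []).any (fun r => decide (times ≤ (r : Int))) = false := by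
          split_ifs with h
          · simp; omega
          · simp
        rw [List.any_append, hpre, Bool.false_or, hrec]

-- ===== VERDICT (by name: the statement is the Claim_ definition above) =====
theorem has_consecutive_fast_movements_spec : Claim_equal_has_consecutive_fast_movements := by
  intro history times _
  unfold Spec_has_consecutive_fast_movements has_consecutive_fast_movements has_consecutive_fast_movements_alt
  exact_mod_cast hcfm_loop_eq_runs times history 0 (Or.inl rfl)
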